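-- pv_equiv track=rewrite | github.com/A1onsotr/IECD114-COMPUTACI-N-I | AlonsoRiosTapiaTarea3/Tarea5AlonsoRios.py | paresmasimpares
-- ===== SOURCE A (Python) =====
-- def listaCreciente(l):
--   #bubble sort
--   for i in range(0,len(l)-1):
--     for j in range(0,len(l)-1):
--       if l[j] > l[j+1]:
--         aux = l[j+1]
--         l[j+1]= l[j]
--         l[j] = aux
--   return l
--
-- def listaDecreciente(l):
--   #bubble sort
--   for i in range(0,len(l)-1):
--     for j in range(0,len(l)-1):
--       if l[j] < l[j+1]:
--         aux = l[j+1]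
--         l[j+1]= l[j]
--         l[j] = aux
--   return l
--
-- def paresmasimpares(l):
--     pares = []
--     impares = []
--     for f in range (0,len(l)):
--         if l[f]%2 == 0:
--             pares.append(l[f])
--         else:
--             impares.append(l[f])
--     listaCreciente(pares)
--     listaDecreciente(impares)
--     return pares+impares
-- ===== SOURCE B (Python) =====
-- def paresmasimpares(l):
--     s = sorted(l)
--     pares = [x for x in s if x % 2 == 0]
--     impares = [x for x in s if x % 2 != 0]
--     return pares + impares[::-1]
-- ===== Notes on version B (the rewrite author's own statement) =====
-- stated objective: faster
-- what changed: One global O(n log n) sort up front, then partition the sorted list into evens/odds and reverse the odds, instead of A's partition followed by two hand-written O(n^2) bubble sorts.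
import Mathlib
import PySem

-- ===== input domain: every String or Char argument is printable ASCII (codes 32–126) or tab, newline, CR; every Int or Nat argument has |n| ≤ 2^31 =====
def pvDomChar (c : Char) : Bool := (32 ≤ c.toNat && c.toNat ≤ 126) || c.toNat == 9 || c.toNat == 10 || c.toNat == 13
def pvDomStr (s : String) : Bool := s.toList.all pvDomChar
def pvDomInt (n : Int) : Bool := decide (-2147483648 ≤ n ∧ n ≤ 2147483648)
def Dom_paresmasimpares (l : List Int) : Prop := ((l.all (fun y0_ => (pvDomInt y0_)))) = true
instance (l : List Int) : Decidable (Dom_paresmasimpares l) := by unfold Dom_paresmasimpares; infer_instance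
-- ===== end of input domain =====

-- B replaces A's partition-then-two-hand-written-bubble-sorts by one global sort followed by
-- a partition of the sorted list (odd part reversed); objective: faster. A mutates only its
-- own local lists, never the argument, so return-value equality is the whole story.

-- ===== PORT A =====
-- one inner bubble pass: 'for j in range(0,len(l)-1): if l[j] > l[j+1]: swap'
def pvPassAsc : List Int → List Int
  | a :: b :: t => if a > b then b :: pvPassAsc (a :: t) else a :: pvPassAsc (b :: t)
  | xs => xs
termination_by l => l.length

def pvPassDesc : List Int → List Int
  | a :: b :: t => if a < b then b :: pvPassDesc (a :: t) else a :: pvPassDesc (b :: t)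
  | xs => xs
termination_by l => l.length

-- 'for i in range(0,len(l)-1):' around the inner pass
def listaCreciente (l : List Int) : List Int :=
  (List.range (l.length - 1)).foldl (fun acc _ => pvPassAsc acc) l

def listaDecreciente (l : List Int) : List Int :=
  (List.range (l.length - 1)).foldl (fun acc _ => pvPassDesc acc) l

def paresmasimpares (l : List Int) : List Int :=
  let pi := l.foldl (fun (pi : List Int × List Int) x =>
      if PySem.Int.mod x 2 == 0 then (pi.1 ++ [x], pi.2) else (pi.1, pi.2 ++ [x]))
    ([], [])
  listaCreciente pi.1 ++ listaDecreciente pi.2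

-- ===== PORT B =====
def paresmasimpares_alt (l : List Int) : List Int :=
  let s := PySem.List.sorted l (fun x => x) false
  let pares := s.filter (fun x => PySem.Int.mod x 2 == 0)
  let impares := s.filter (fun x => !(PySem.Int.mod x 2 == 0))
  pares ++ impares.reverse

-- ===== PRECONDITION & SPEC =====
def Spec_paresmasimpares (l : List Int) (out : List Int) : Prop := out = paresmasimpares_alt l
instance (l : List Int) (out : List Int) : Decidable (Spec_paresmasimpares l out) := by unfold Spec_paresmasimpares; infer_instance

-- ===== CLAIM (what is proved, stated in full; the proofs are below) =====
def Claim_equal_paresmasimpares : Prop := ∀ (l : List Int), Dom_paresmasimpares l → Spec_paresmasimpares l (paresmasimpares l)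

-- ===== LEMMAS AND PROOFS =====

theorem pvPassAsc_perm (l : List Int) : (pvPassAsc l).Perm l := by
  fun_induction pvPassAsc l with
  | case1 a b t h ih => exact ((ih.cons b).trans (List.Perm.swap a b t))
  | case2 a b t h ih => exact ih.cons a
  | case3 xs h => exact List.Perm.refl xs

theorem pvPassDesc_perm (l : List Int) : (pvPassDesc l).Perm l := by
  fun_induction pvPassDesc l with
  | case1 a b t h ih => exact ((ih.cons b).trans (List.Perm.swap a b t))
  | case2 a b t h ih => exact ih.cons a
  | case3 xs h => exact List.Perm.refl xs

theorem pvPassAsc_of_pairwise (s : List Int) (hs : s.Pairwise (· ≤ ·)) : pvPassAsc s = s := by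
  fun_induction pvPassAsc s with
  | case1 a b t h ih => exact absurd ((List.pairwise_cons.mp hs).1 b (by simp)) (not_le.mpr h)
  | case2 a b t h ih => rw [ih (List.pairwise_cons.mp hs).2]
  | case3 xs h => rfl

theorem pvPassDesc_of_pairwise (s : List Int) (hs : s.Pairwise (fun a b => b ≤ a)) : pvPassDesc s = s := by
  fun_induction pvPassDesc s with
  | case1 a b t h ih => exact absurd ((List.pairwise_cons.mp hs).1 b (by simp)) (not_le.mpr h)
  | case2 a b t h ih => rw [ih (List.pairwise_cons.mp hs).2]
  | case3 xs h => rfl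

theorem pvPassAsc_append (t s : List Int) (hs : s.Pairwise (· ≤ ·))
    (hts : ∀ x ∈ t, ∀ y ∈ s, x ≤ y) : pvPassAsc (t ++ s) = pvPassAsc t ++ s := by
  fun_induction pvPassAsc t with
  | case1 a b t h ih =>
    rw [List.cons_append, List.cons_append, pvPassAsc, if_pos h,
      ← List.cons_append, ih (by intro x hx y hy; exact hts x (by simp at hx ⊢; tauto) y hy)]
    simp
  | case2 a b t h ih =>
    rw [List.cons_append, List.cons_append, pvPassAsc, if_neg h,
      ← List.cons_append, ih (by intro x hx y hy; exact hts x (by simp at hx ⊢; tauto) y hy)]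
    simp
  | case3 xs h =>
    rcases xs with _ | ⟨a, _ | ⟨b, t⟩⟩
    · simpa using pvPassAsc_of_pairwise s hs
    · cases s with
      | nil => simp [pvPassAsc]
      | cons b s' =>
        rw [List.singleton_append, pvPassAsc, if_neg (not_lt.mpr (hts a (by simp) b (by simp)))]
        rw [pvPassAsc_of_pairwise _ hs]
    · exact absurd rfl (h a b t)

theorem pvPassDesc_append (t s : List Int) (hs : s.Pairwise (fun a b => b ≤ a))
    (hts : ∀ x ∈ t, ∀ y ∈ s, y ≤ x) : pvPassDesc (t ++ s) = pvPassDesc t ++ s := by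
  fun_induction pvPassDesc t with
  | case1 a b t h ih =>
    rw [List.cons_append, List.cons_append, pvPassDesc, if_pos h,
      ← List.cons_append, ih (by intro x hx y hy; exact hts x (by simp at hx ⊢; tauto) y hy)]
    simp
  | case2 a b t h ih =>
    rw [List.cons_append, List.cons_append, pvPassDesc, if_neg h,
      ← List.cons_append, ih (by intro x hx y hy; exact hts x (by simp at hx ⊢; tauto) y hy)]
    simp
  | case3 xs h =>
    rcases xs with _ | ⟨a, _ | ⟨b, t⟩⟩
    · simpa using pvPassDesc_of_pairwise s hs
    · cases s with
      | nil => simp [pvPassDesc]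
      | cons b s' =>
        rw [List.singleton_append, pvPassDesc, if_neg (not_lt.mpr (hts a (by simp) b (by simp)))]
        rw [pvPassDesc_of_pairwise _ hs]
    · exact absurd rfl (h a b t)

theorem pvPassAsc_max (a : Int) (l : List Int) :
    ∃ t M, pvPassAsc (a :: l) = t ++ [M] ∧ ∀ x ∈ a :: l, x ≤ M := by
  induction l generalizing a with
  | nil => exact ⟨[], a, by simp [pvPassAsc], by simp⟩
  | cons b t ih =>
    by_cases h : a > b
    · obtain ⟨u, M, hu, hM⟩ := ih a
      refine ⟨b :: u, M, ?_, ?_⟩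
      · rw [pvPassAsc, if_pos h, hu]; rfl
      · intro x hx
        simp only [List.mem_cons] at hx
        rcases hx with rfl | rfl | hx
        · exact hM x (by simp)
        · exact le_trans h.le (hM a (by simp))
        · exact hM x (by simp [hx])
    · obtain ⟨u, M, hu, hM⟩ := ih b
      refine ⟨a :: u, M, ?_, ?_⟩
      · rw [pvPassAsc, if_neg h, hu]; rfl
      · intro x hx
        simp only [List.mem_cons] at hx
        rcases hx with rfl | hx
        · exact le_trans (not_lt.mp h) (hM b (by simp))
        · exact hM x (by simpa using hx)

theorem pvPassDesc_min (a : Int) (l : List Int) :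
    ∃ t M, pvPassDesc (a :: l) = t ++ [M] ∧ ∀ x ∈ a :: l, M ≤ x := by
  induction l generalizing a with
  | nil => exact ⟨[], a, by simp [pvPassDesc], by simp⟩
  | cons b t ih =>
    by_cases h : a < b
    · obtain ⟨u, M, hu, hM⟩ := ih a
      refine ⟨b :: u, M, ?_, ?_⟩
      · rw [pvPassDesc, if_pos h, hu]; rfl
      · intro x hx
        simp only [List.mem_cons] at hx
        rcases hx with rfl | rfl | hx
        · exact hM x (by simp)
        · exact le_trans (hM a (by simp)) h.le
        · exact hM x (by simp [hx])
    · obtain ⟨u, M, hu, hM⟩ := ih b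
      refine ⟨a :: u, M, ?_, ?_⟩
      · rw [pvPassDesc, if_neg h, hu]; rfl
      · intro x hx
        simp only [List.mem_cons] at hx
        rcases hx with rfl | hx
        · exact le_trans (hM b (by simp)) (not_lt.mp h)
        · exact hM x (by simpa using hx)

theorem pvIterAsc_sorted : ∀ (n : Nat) (t s : List Int), t.length ≤ n + 1 →
    s.Pairwise (· ≤ ·) → (∀ x ∈ t, ∀ y ∈ s, x ≤ y) →
    (pvPassAsc^[n] (t ++ s)).Pairwise (· ≤ ·) := by
  intro n
  induction n with
  | zero =>
    intro t s ht hs hts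
    rcases t with _ | ⟨a, _ | _⟩
    · simpa using hs
    · exact List.pairwise_cons.mpr ⟨fun y hy => hts a (by simp) y hy, hs⟩
    · simp at ht
  | succ n ih =>
    intro t s ht hs hts
    rcases t with _ | ⟨a, t'⟩
    · rw [List.nil_append, Function.iterate_fixed (pvPassAsc_of_pairwise s hs)]
      exact hs
    · obtain ⟨u, M, hu, hM⟩ := pvPassAsc_max a t'
      have hperm : (u ++ [M]).Perm (a :: t') := hu ▸ pvPassAsc_perm (a :: t')
      have hMmem : M ∈ a :: t' := hperm.mem_iff.mp (by simp)
      have humem : ∀ x ∈ u, x ∈ a :: t' := fun x hx => hperm.mem_iff.mp (by simp [hx])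
      rw [Function.iterate_succ_apply,
        pvPassAsc_append (a :: t') s hs hts, hu, List.append_assoc]
      refine ih u ([M] ++ s) ?_ ?_ ?_
      · have h1 := hperm.length_eq
        have h2 := ht
        simp only [List.length_append, List.length_cons, List.length_nil] at h1 h2 ⊢
        omega
      · exact List.pairwise_cons.mpr ⟨fun y hy => hts M hMmem y hy, hs⟩
      · intro x hx y hy
        rcases List.mem_cons.mp hy with rfl | hy
        · exact hM x (humem x hx)
        · exact hts x (humem x hx) y hy

theorem pvIterDesc_sorted : ∀ (n : Nat) (t s : List Int), t.length ≤ n + 1 →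
    s.Pairwise (fun a b => b ≤ a) → (∀ x ∈ t, ∀ y ∈ s, y ≤ x) →
    (pvPassDesc^[n] (t ++ s)).Pairwise (fun a b => b ≤ a) := by
  intro n
  induction n with
  | zero =>
    intro t s ht hs hts
    rcases t with _ | ⟨a, _ | _⟩
    · simpa using hs
    · exact List.pairwise_cons.mpr ⟨fun y hy => hts a (by simp) y hy, hs⟩
    · simp at ht
  | succ n ih =>
    intro t s ht hs hts
    rcases t with _ | ⟨a, t'⟩
    · rw [List.nil_append, Function.iterate_fixed (pvPassDesc_of_pairwise s hs)]
      exact hs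
    · obtain ⟨u, M, hu, hM⟩ := pvPassDesc_min a t'
      have hperm : (u ++ [M]).Perm (a :: t') := hu ▸ pvPassDesc_perm (a :: t')
      have hMmem : M ∈ a :: t' := hperm.mem_iff.mp (by simp)
      have humem : ∀ x ∈ u, x ∈ a :: t' := fun x hx => hperm.mem_iff.mp (by simp [hx])
      rw [Function.iterate_succ_apply,
        pvPassDesc_append (a :: t') s hs hts, hu, List.append_assoc]
      refine ih u ([M] ++ s) ?_ ?_ ?_
      · have h1 := hperm.length_eq
        have h2 := ht
        simp only [List.length_append, List.length_cons, List.length_nil] at h1 h2 ⊢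
        omega
      · exact List.pairwise_cons.mpr ⟨fun y hy => hts M hMmem y hy, hs⟩
      · intro x hx y hy
        rcases List.mem_cons.mp hy with rfl | hy
        · exact hM x (humem x hx)
        · exact hts x (humem x hx) y hy

theorem pvFoldlRange (f : List Int → List Int) (n : Nat) (a : List Int) :
    (List.range n).foldl (fun acc _ => f acc) a = f^[n] a := by
  induction n with
  | zero => rfl
  | succ n ih => rw [List.range_succ, List.foldl_append, ih, List.foldl_cons, List.foldl_nil,
      Function.iterate_succ_apply']

theorem pvIter_perm (f : List Int → List Int) (hf : ∀ l, (f l).Perm l)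
    (n : Nat) (l : List Int) : (f^[n] l).Perm l := by
  induction n with
  | zero => simp
  | succ n ih => rw [Function.iterate_succ_apply']; exact (hf _).trans ih

theorem listaCreciente_eq_sorted (l : List Int) :
    PySem.List.sorted l (fun x => x) false = listaCreciente l := by
  apply PySem.List.sorted_id_eq_of_perm_of_pairwise
  · rw [listaCreciente, pvFoldlRange]; exact pvIter_perm _ pvPassAsc_perm _ _
  · rw [listaCreciente, pvFoldlRange]
    have := pvIterAsc_sorted (l.length - 1) l [] (by omega) (by simp) (by simp)
    simpa using this

theorem listaDecreciente_rev_eq_sorted (l : List Int) :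
    PySem.List.sorted l (fun x => x) false = (listaDecreciente l).reverse := by
  apply PySem.List.sorted_id_eq_of_perm_of_pairwise
  · rw [listaDecreciente, pvFoldlRange]
    exact (List.reverse_perm _).trans (pvIter_perm _ pvPassDesc_perm _ _)
  · rw [listaDecreciente, pvFoldlRange, List.pairwise_reverse]
    have := pvIterDesc_sorted (l.length - 1) l [] (by omega) (by simp) (by simp)
    simpa using this

theorem pvPartition (l : List Int) (p : Int → Bool) (a b : List Int) :
    l.foldl (fun (pi : List Int × List Int) x =>
      if p x then (pi.1 ++ [x], pi.2) else (pi.1, pi.2 ++ [x])) (a, b)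
    = (a ++ l.filter p, b ++ l.filter (fun x => !(p x))) := by
  induction l generalizing a b with
  | nil => simp
  | cons x t ih =>
    by_cases h : p x = true <;> simp [h, ih]

theorem pvSortedFilter (l : List Int) (p : Int → Bool) :
    PySem.List.sorted (l.filter p) (fun x => x) false
      = (PySem.List.sorted l (fun x => x) false).filter p := by
  apply PySem.List.sorted_id_eq_of_perm_of_pairwise
  · exact (PySem.List.sorted_perm l (fun x => x) false).filter p
  · exact ((PySem.List.sorted_pairwise l (fun x => x)).sublist List.filter_sublist)

-- ===== VERDICT (by name: the statement is the Claim_ definition above) =====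
theorem paresmasimpares_spec : Claim_equal_paresmasimpares := by
  intro l _
  unfold Spec_paresmasimpares paresmasimpares paresmasimpares_alt
  simp only [pvPartition, List.nil_append]
  rw [← listaCreciente_eq_sorted, pvSortedFilter]
  congr 1
  have h := listaDecreciente_rev_eq_sorted (l.filter (fun x => !(PySem.Int.mod x 2 == 0)))
  rw [pvSortedFilter] at h
  rw [h, List.reverse_reverse]
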